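-- pv_equiv track=rewrite | github.com/harim061/Programmers | 프로그래머스/Lv.0/120869. 외계어 사전/외계어 사전.py | solution
-- ===== SOURCE A (Python) =====
-- def solution(spell, dic):
--
--     res = False
--
--     for word in dic:
--         spell_copy = spell.copy()
--         for char in word:
--             if(char in spell_copy):
--                 spell_copy.remove(char)
--
--             else:
--                 break
--
--         else:
--             if not spell_copy:
--                 res = True
--                 break
--
--
--     if res==True :return 1
--     else: return 2
-- ===== SOURCE B (Python) =====
-- def solution(spell, dic):
--     key = sorted(spell)
--     return 1 if any(sorted(word) == key for word in dic) else 2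
-- ===== Notes on version B (the rewrite author's own statement) =====
-- stated objective: faster
-- what changed: Replaces the per-word copy-and-remove loop (greedy multiset subtraction with break/else, quadratic per word) by a canonical-key anagram test: sort spell once and compare sorted(word) == sorted(spell) for each word.
import Mathlib
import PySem

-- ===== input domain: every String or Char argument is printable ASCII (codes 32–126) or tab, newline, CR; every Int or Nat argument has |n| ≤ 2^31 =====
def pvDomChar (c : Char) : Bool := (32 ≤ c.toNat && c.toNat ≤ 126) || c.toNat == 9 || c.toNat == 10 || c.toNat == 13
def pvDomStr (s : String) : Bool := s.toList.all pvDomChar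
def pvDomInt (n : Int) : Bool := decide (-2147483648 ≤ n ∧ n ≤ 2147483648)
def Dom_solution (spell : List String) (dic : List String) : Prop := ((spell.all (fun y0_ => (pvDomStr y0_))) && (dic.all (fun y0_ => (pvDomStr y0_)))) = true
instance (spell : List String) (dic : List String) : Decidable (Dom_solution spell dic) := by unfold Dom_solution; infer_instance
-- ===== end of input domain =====

-- B replaces A's per-word copy-and-remove loop by sorting spell once and comparing sorted(word) to it (measured faster, asymptotic; return value only).

-- ===== PORT A =====
-- inner 'for char in word' loop: returns the final spell_copy, or none on break
def solutionInner (chars : List Char) (spellCopy : List String) : Option (List String) :=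
  match chars with
  | [] => some spellCopy
  | c :: rest =>
      if String.mk [c] ∈ spellCopy then
        solutionInner rest ((PySem.List.remove? spellCopy (String.mk [c])).getD spellCopy)
      else
        none  -- break

-- outer 'for word in dic' loop computing res (break as early return true)
def solutionLoop (spell : List String) (dic : List String) : Bool :=
  match dic with
  | [] => false
  | word :: rest =>
      match solutionInner word.toList spell with
      | some sc => if sc = [] then true else solutionLoop spell rest  -- for-else branch
      | none => solutionLoop spell rest

def solution (spell : List String) (dic : List String) : Int :=
  if solutionLoop spell dic = true then 1 else 2

-- ===== PORT B =====
def solution_alt (spell : List String) (dic : List String) : Int :=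
  let key := PySem.List.sorted spell (fun x => x) false
  if dic.any (fun word =>
      PySem.List.sorted (word.toList.map (fun c => String.mk [c])) (fun x => x) false = key)
  then 1 else 2

-- ===== PRECONDITION & SPEC =====
def Spec_solution (spell : List String) (dic : List String) (out : Int) : Prop := out = solution_alt spell dic
instance (spell : List String) (dic : List String) (out : Int) : Decidable (Spec_solution spell dic out) := by unfold Spec_solution; infer_instance

-- ===== CLAIM (what is proved, stated in full; the proofs are below) =====
def Claim_equal_solution : Prop := ∀ (spell : List String) (dic : List String), Dom_solution spell dic → Spec_solution spell dic (solution spell dic)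

-- ===== LEMMAS AND PROOFS =====

-- If the inner loop finishes with sc', then spellCopy was exactly the chars consumed plus sc'.
theorem solutionInner_perm (chars : List Char) (sc sc' : List String)
    (h : solutionInner chars sc = some sc') :
    ((chars.map (fun c => String.mk [c])) ++ sc').Perm sc := by
  induction chars generalizing sc with
  | nil =>
      simp [solutionInner] at h
      simp [h]
  | cons c rest ih =>
      simp only [solutionInner] at h
      split at h
      · rename_i hmem
        rw [PySem.List.remove?_eq_some_erase sc _ hmem] at h
        simp only [Option.getD_some] at h
        have := ih _ h
        have h2 : sc.Perm (String.mk [c] :: sc.erase (String.mk [c])) := List.perm_cons_erase hmem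
        simp only [List.map_cons, List.cons_append]
        exact (List.Perm.cons _ this).trans h2.symm
      · exact absurd h (by simp)

-- Converse: if spellCopy is a permutation of the chars, the inner loop empties it.
theorem solutionInner_of_perm (chars : List Char) (sc : List String)
    (h : sc.Perm (chars.map (fun c => String.mk [c]))) :
    solutionInner chars sc = some [] := by
  induction chars generalizing sc with
  | nil =>
      have := List.Perm.eq_nil h
      simp [solutionInner, this]
  | cons c rest ih =>
      have hmem : String.mk [c] ∈ sc := h.mem_iff.mpr (by simp)
      have hce : sc.Perm (String.mk [c] :: sc.erase (String.mk [c])) := List.perm_cons_erase hmem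
      have hrest : (sc.erase (String.mk [c])).Perm (rest.map (fun c => String.mk [c])) := by
        have : (String.mk [c] :: sc.erase (String.mk [c])).Perm
            (String.mk [c] :: rest.map (fun c => String.mk [c])) := by
          refine hce.symm.trans ?_
          simpa using h
        exact this.cons_inv
      simp only [solutionInner, hmem, if_pos, PySem.List.remove?_eq_some_erase sc _ hmem]
      exact ih _ hrest

theorem solutionLoop_iff (spell : List String) (dic : List String) :
    solutionLoop spell dic = true ↔
      ∃ w ∈ dic, spell.Perm (w.toList.map (fun c => String.mk [c])) := by
  induction dic with
  | nil => simp [solutionLoop]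
  | cons word rest ih =>
      simp only [solutionLoop]
      constructor
      · intro h
        cases hinner : solutionInner word.toList spell with
        | some sc =>
            rw [hinner] at h
            by_cases hsc : sc = []
            · refine ⟨word, by simp, ?_⟩
              have := solutionInner_perm _ _ _ hinner
              rw [hsc] at this
              simpa using this.symm
            · simp only [hsc, if_false] at h
              obtain ⟨w, hw, hp⟩ := ih.mp h
              exact ⟨w, by simp [hw], hp⟩
        | none =>
            rw [hinner] at h
            obtain ⟨w, hw, hp⟩ := ih.mp h
            exact ⟨w, by simp [hw], hp⟩
      · rintro ⟨w, hw, hp⟩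
        rcases List.mem_cons.mp hw with rfl | hw'
        · rw [solutionInner_of_perm _ _ hp]
          simp
        · cases hinner : solutionInner word.toList spell with
          | some sc =>
              by_cases hsc : sc = [] <;> simp [hsc, ih.mpr ⟨w, hw', hp⟩]
          | none => exact ih.mpr ⟨w, hw', hp⟩

theorem solution_spec : Claim_equal_solution := by
  intro spell dic _
  unfold Spec_solution solution solution_alt
  have key : solutionLoop spell dic =
      dic.any (fun word =>
        PySem.List.sorted (word.toList.map (fun c => String.mk [c])) (fun x => x) false
          = PySem.List.sorted spell (fun x => x) false) := by
    rw [Bool.eq_iff_iff, solutionLoop_iff, List.any_eq_true]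
    constructor
    · rintro ⟨w, hw, hp⟩
      exact ⟨w, hw, by rw [decide_eq_true_iff, PySem.List.sorted_id_eq_sorted_id_iff_perm]; exact hp.symm⟩
    · rintro ⟨w, hw, hd⟩
      rw [decide_eq_true_iff, PySem.List.sorted_id_eq_sorted_id_iff_perm] at hd
      exact ⟨w, hw, hd.symm⟩
  simp only [key]
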